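-- pv_equiv track=rewrite | github.com/baloghe/tr_en_dictionary | test/tst_verbcnt.py | prcSrc
-- ===== SOURCE A (Python) =====
-- def prcSrc(src):
--     s = src.split('.')
--     ret = []
--     for i in s:
--         if ret:
--             ret.append(ret[len(ret)-1] + '.' + i)
--         else:
--             ret.append(i)
--     return ret
-- ===== SOURCE B (Python) =====
-- def prcSrc(src):
--     s = src.split('.')
--     return ['.'.join(s[:i + 1]) for i in range(len(s))]
-- ===== Notes on version B (the rewrite author's own statement) =====
-- stated objective: simpler
-- what changed: Replaces the stateful loop (each entry built by appending a dot and the next part to the previously built entry) with a direct per-index recomputation: entry i joins the first i+1 parts, no running accumulator.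
import Mathlib
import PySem

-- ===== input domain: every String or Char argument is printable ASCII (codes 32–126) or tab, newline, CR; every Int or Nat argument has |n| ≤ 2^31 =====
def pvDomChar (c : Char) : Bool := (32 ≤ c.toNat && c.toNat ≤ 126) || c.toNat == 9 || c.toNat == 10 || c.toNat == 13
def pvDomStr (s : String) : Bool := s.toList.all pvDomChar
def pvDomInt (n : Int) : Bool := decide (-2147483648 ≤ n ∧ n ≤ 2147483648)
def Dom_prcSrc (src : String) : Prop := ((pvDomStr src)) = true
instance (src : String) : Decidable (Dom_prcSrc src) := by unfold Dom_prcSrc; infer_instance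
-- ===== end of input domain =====

-- B replaces A's running accumulator (each entry = previous entry, a dot, and the part) with a
-- direct per-index recomputation: entry i = '.'.join of the first i+1 parts ("simpler").

-- ===== PORT A =====
-- the loop body: 'if ret: ret.append(ret[len(ret)-1] plus dot plus i) else: ret.append(i)'
def prcSrcStep (ret : List (List Char)) (i : List Char) : List (List Char) :=
  if ret ≠ [] then ret ++ [ret.getLast! ++ ['.'] ++ i] else ret ++ [i]

def prcSrc (src : String) : List String :=
  ((PySem.Chars.splitOn src.toList ['.']).foldl prcSrcStep []).map String.ofList

-- ===== PORT B =====
-- ['.'.join(s[:i+1]) for i in range(len(s))]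
def prcSrc_alt (src : String) : List String :=
  (List.range (PySem.Chars.splitOn src.toList ['.']).length).map
    (fun i => String.ofList (PySem.Chars.join ['.'] ((PySem.Chars.splitOn src.toList ['.']).take (i + 1))))

-- ===== PRECONDITION & SPEC =====
def Spec_prcSrc (src : String) (out : List String) : Prop := out = prcSrc_alt src
instance (src : String) (out : List String) : Decidable (Spec_prcSrc src out) := by unfold Spec_prcSrc; infer_instance

-- ===== CLAIM (what is proved, stated in full; the proofs are below) =====
def Claim_equal_prcSrc : Prop := ∀ (src : String), Dom_prcSrc src → Spec_prcSrc src (prcSrc src)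

-- ===== LEMMAS AND PROOFS =====

-- join over an appended last chunk, for a nonempty prefix
theorem join_append_singleton (s : List (List Char)) (x : List Char) (h : s ≠ []) :
    PySem.Chars.join ['.'] (s ++ [x]) = PySem.Chars.join ['.'] s ++ ['.'] ++ x := by
  induction s with
  | nil => simp at h
  | cons p rest ih =>
    cases rest with
    | nil => simp [PySem.Chars.join_cons_cons, PySem.Chars.join_singleton]
    | cons q rest' =>
      have := ih (by simp)
      simp only [List.cons_append, PySem.Chars.join_cons_cons] at this ⊢
      simp [this]

-- getLast! of a list with an appended element (used for ret[len(ret)-1] after an append)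
theorem getLast!_concat' (l : List (List Char)) (a : List Char) : (l ++ [a]).getLast! = a := by
  cases l with
  | nil => rfl
  | cons b bs =>
    rw [show (b :: bs) ++ [a] = b :: (bs ++ [a]) from rfl, List.getLast!]
    simp

-- A's fold equals B's per-index recomputation, on any parts list
theorem fold_eq_map (s : List (List Char)) :
    s.foldl prcSrcStep [] =
      (List.range s.length).map (fun i => PySem.Chars.join ['.'] (s.take (i + 1))) := by
  induction s using List.reverseRecOn with
  | nil => simp
  | append_singleton s x ih =>
    rw [List.foldl_append, List.foldl_cons, List.foldl_nil, ih]
    cases s with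
    | nil => simp [prcSrcStep, PySem.Chars.join_singleton]
    | cons p rest =>
      have hne : (List.range (p :: rest).length).map
          (fun i => PySem.Chars.join ['.'] ((p :: rest).take (i + 1))) ≠ [] := by simp
      unfold prcSrcStep
      rw [if_pos hne]
      have hlast : ((List.range (p :: rest).length).map
          (fun i => PySem.Chars.join ['.'] ((p :: rest).take (i + 1)))).getLast! =
          PySem.Chars.join ['.'] (p :: rest) := by
        rw [show (p :: rest).length = rest.length + 1 from rfl, List.range_succ,
          List.map_append]
        rw [List.map_singleton, getLast!_concat']
        simp
      rw [hlast]
      rw [show ((p :: rest) ++ [x]).length = (p :: rest).length + 1 by simp, List.range_succ,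
        List.map_append, List.map_singleton]
      have htail : PySem.Chars.join ['.'] (((p :: rest) ++ [x]).take ((p :: rest).length + 1)) =
          PySem.Chars.join ['.'] (p :: rest) ++ ['.'] ++ x := by
        rw [show (p :: rest).length + 1 = ((p :: rest) ++ [x]).length by simp, List.take_length]
        exact join_append_singleton _ _ (by simp)
      rw [htail]
      congr 1
      apply List.map_congr_left
      intro i hi
      rw [List.take_append_of_le_length]
      simp only [List.mem_range] at hi
      simpa using hi

-- ===== VERDICT (by name: the statement is the Claim_ definition above) =====
theorem prcSrc_spec : Claim_equal_prcSrc := by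
  intro src _
  unfold Spec_prcSrc prcSrc prcSrc_alt
  rw [fold_eq_map]
  simp
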